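-- pv_equiv track=rewrite | github.com/mvanede/advent-of-code-2020 | ass-day-18-2.py | parse_parentheses
-- ===== SOURCE A (Python) =====
-- def parse_parentheses(string):
--     stack = []
--     for i, c in enumerate(string):
--         if c == '(':
--             stack.append(i)
--         elif c == ')' and stack:
--             start = stack.pop()
--             yield len(stack), string[start + 1: i]
-- ===== SOURCE B (Python) =====
-- def parse_parentheses(string):
--     # Recursive descent over indices: one frame per nesting level (no explicit index stack).
--     def walk(i, depth):
--         # Returns (items, close): items yielded during this level, close = index of the
--         # closing paren that ends this level, or None if the string ran out first.
--         out = []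
--         while i < len(string):
--             c = string[i]
--             if c == '(':
--                 inner, close = walk(i + 1, depth + 1)
--                 out += inner
--                 if close is None:
--                     return out, None
--                 out.append((depth, string[i + 1:close]))
--                 i = close + 1
--             elif c == ')' and depth > 0:
--                 return out, i
--             else:
--                 i += 1
--         return out, None
--     yield from walk(0, 0)[0]
-- ===== Notes on version B (the rewrite author's own statement) =====
-- stated objective: alternative
-- what changed: Replaces A's single loop with an explicit stack of open-paren indices by a recursive-descent walk over string indices: one recursion frame per nesting level returns the items yielded inside that group plus the index of its closing paren, emitting yields in the same closing order.
import Mathlib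
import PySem

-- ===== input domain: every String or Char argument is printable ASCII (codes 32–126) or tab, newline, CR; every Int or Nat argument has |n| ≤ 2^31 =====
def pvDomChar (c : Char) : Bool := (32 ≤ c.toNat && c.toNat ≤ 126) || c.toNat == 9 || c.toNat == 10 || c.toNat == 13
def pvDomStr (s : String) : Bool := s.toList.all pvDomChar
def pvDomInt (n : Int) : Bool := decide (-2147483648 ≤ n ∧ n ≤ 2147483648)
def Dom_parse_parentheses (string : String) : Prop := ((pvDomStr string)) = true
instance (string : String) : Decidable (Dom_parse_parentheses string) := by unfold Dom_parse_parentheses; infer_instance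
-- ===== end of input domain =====

-- B re-implements A's generator as a recursive-descent walk over indices (one recursion
-- frame per nesting level) instead of A's single loop with an explicit stack of open-paren indices;
-- same complexity, different decomposition.

-- ===== PORT A =====
-- one step of A's for-loop body: state = (stack of open-paren indices, yields so far)
def stepA (cs : List Char) (st : List Int × List (Int × String)) (p : Int × Char) :
    List Int × List (Int × String) :=
  let (stack, acc) := st
  let (i, c) := p
  if c = '(' then (i :: stack, acc)
  else if c = ')' then
    match stack with
    | [] => (stack, acc)
    | start :: rest =>
        (rest, acc ++ [((rest.length : Int),
          String.ofList (PySem.List.slice cs (some (start + 1)) (some i)))])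
  else (stack, acc)

def parse_parentheses (string : String) : List (Int × String) :=
  let cs := string.toList
  ((PySem.List.enumerate cs 0).foldl (stepA cs) ([], [])).2

-- ===== PORT B =====
-- Source B's walk(i, depth): `out` is the while-loop accumulator; `fuel` only makes the
-- recursion total (it is always sufficient, see the lemmas below).
def walkB (cs : List Char) (fuel : Nat) (i : Nat) (depth : Nat)
    (out : List (Int × String)) : List (Int × String) × Option Nat :=
  match fuel with
  | 0 => (out, none)
  | fuel + 1 =>
    match cs[i]? with
    | none => (out, none)
    | some c =>
      if c = '(' then
        let (inner, close?) := walkB cs fuel (i + 1) (depth + 1) []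
        match close? with
        | none => (out ++ inner, none)
        | some close =>
            walkB cs fuel (close + 1) depth
              (out ++ inner ++ [((depth : Int),
                String.ofList (PySem.List.slice cs (some ((i : Int) + 1)) (some (close : Int))))])
      else if c = ')' ∧ 0 < depth then (out, some i)
      else walkB cs fuel (i + 1) depth out

def parse_parentheses_alt (string : String) : List (Int × String) :=
  let cs := string.toList
  (walkB cs (cs.length + 1) 0 0 []).1

-- ===== PRECONDITION & SPEC =====
def Spec_parse_parentheses (string : String) (out : List (Int × String)) : Prop := out = parse_parentheses_alt string
instance (string : String) (out : List (Int × String)) : Decidable (Spec_parse_parentheses string out) := by unfold Spec_parse_parentheses; infer_instance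

-- ===== CLAIM (what is proved, stated in full; the proofs are below) =====
def Claim_equal_parse_parentheses : Prop := ∀ (string : String), Dom_parse_parentheses string → Spec_parse_parentheses string (parse_parentheses string)

-- ===== LEMMAS AND PROOFS =====

-- the while-loop accumulator `out` is just prepended to the result
lemma walkB_out (cs : List Char) (fuel : Nat) :
    ∀ i depth out, walkB cs fuel i depth out =
      (out ++ (walkB cs fuel i depth []).1, (walkB cs fuel i depth []).2) := by
  induction fuel with
  | zero => intro i depth out; simp [walkB]
  | succ fuel ih =>
    intro i depth out
    rw [walkB, walkB]
    cases h : cs[i]? with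
    | none => simp
    | some c =>
      simp only
      by_cases hc : c = '('
      · simp only [if_pos hc]
        cases ho : (walkB cs fuel (i + 1) (depth + 1) []).2 with
        | none => simp
        | some close =>
          simp only
          rw [ih (close + 1) depth, ih (close + 1) depth (_ ++ _ ++ _)]
          simp
      · simp only [if_neg hc]
        by_cases hd : c = ')' ∧ 0 < depth
        · simp [if_pos hd]
        · simp only [if_neg hd]
          exact ih (i + 1) depth out

-- a returned closing index lies at or after the start, inside the string, and only at depth > 0
lemma walkB_close (cs : List Char) (fuel : Nat) :
    ∀ i depth close, (walkB cs fuel i depth []).2 = some close →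
      i ≤ close ∧ close < cs.length ∧ 0 < depth := by
  induction fuel with
  | zero => intro i depth close h; simp [walkB] at h
  | succ fuel ih =>
    intro i depth close h
    rw [walkB] at h
    cases hg : cs[i]? with
    | none => rw [hg] at h; simp at h
    | some c =>
      rw [hg] at h
      simp only at h
      by_cases hc : c = '('
      · rw [if_pos hc] at h
        cases ho : (walkB cs fuel (i + 1) (depth + 1) []).2 with
        | none => rw [ho] at h; simp at h
        | some close1 =>
          rw [ho] at h
          simp only at h
          rw [walkB_out] at h
          simp only at h
          obtain ⟨h1, -, -⟩ := ih (i + 1) (depth + 1) close1 ho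
          obtain ⟨h2, h3, h4⟩ := ih (close1 + 1) depth close h
          exact ⟨by omega, h3, h4⟩
      · rw [if_neg hc] at h
        by_cases hd : c = ')' ∧ 0 < depth
        · rw [if_pos hd] at h
          simp only [Option.some.injEq] at h
          have hi : i < cs.length := by
            by_contra hlen
            simp [List.getElem?_eq_none (by omega : cs.length ≤ i)] at hg
          have hic : i = close := h
          exact ⟨by omega, by omega, hd.2⟩
        · rw [if_neg hd] at h
          obtain ⟨h1, h2, h3⟩ := ih (i + 1) depth close h
          exact ⟨by omega, h2, h3⟩

-- the machine run of A from index i on the rest of the string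
def runA (cs : List Char) (i : Nat) (st : List Int × List (Int × String)) :
    List Int × List (Int × String) :=
  (PySem.List.enumerate (cs.drop i) (i : Int)).foldl (stepA cs) st

lemma runA_end (cs : List Char) (i : Nat) (st : List Int × List (Int × String))
    (hi : cs.length ≤ i) : runA cs i st = st := by
  simp [runA, List.drop_eq_nil_of_le hi, PySem.List.enumerate_nil]

lemma runA_step (cs : List Char) (i : Nat) (st : List Int × List (Int × String))
    (hi : i < cs.length) :
    runA cs i st = runA cs (i + 1) (stepA cs st ((i : Int), cs[i])) := by
  unfold runA
  rw [← List.getElem_cons_drop hi, PySem.List.enumerate_cons, List.foldl_cons]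
  norm_num

-- main simulation: A's stack machine from index i versus B's walk at depth = stack.length
lemma walkB_runA (cs : List Char) (fuel : Nat) :
    ∀ i (stack : List Int) (acc : List (Int × String)),
      cs.length - i < fuel → i ≤ cs.length →
      (match walkB cs fuel i stack.length [] with
       | (items, none) => (runA cs i (stack, acc)).2 = acc ++ items
       | (items, some close) =>
         match stack with
         | [] => False
         | t :: rest =>
             runA cs i (t :: rest, acc) =
               runA cs (close + 1) (rest,
                 acc ++ items ++ [((rest.length : Int),
                   String.ofList (PySem.List.slice cs (some (t + 1)) (some (close : Int))))])) := by
  induction fuel with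
  | zero => intro i stack acc hf hi; omega
  | succ fuel ih =>
    intro i stack acc hf hi
    rw [walkB]
    cases hg : cs[i]? with
    | none =>
      have hlen : cs.length ≤ i := by
        by_contra hx
        simp [List.getElem?_eq_getElem (by omega : i < cs.length)] at hg
      simp [runA_end cs i (stack, acc) hlen]
    | some c =>
      have hilt : i < cs.length := by
        by_contra hx
        simp [List.getElem?_eq_none (by omega : cs.length ≤ i)] at hg
      have hci : cs[i] = c := by
        have := List.getElem?_eq_getElem hilt
        rw [hg] at this; exact (Option.some.injEq _ _ ▸ this).symm
      simp only
      by_cases hc : c = '('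
      · -- open paren: descend
        rw [if_pos hc]
        have hstep : runA cs i (stack, acc) = runA cs (i + 1) ((i : Int) :: stack, acc) := by
          rw [runA_step cs i _ hilt, hci, hc]; rfl
        rcases hw : walkB cs fuel (i + 1) (stack.length + 1) [] with ⟨inner, close?⟩
        have ih1 := ih (i + 1) ((i : Int) :: stack) acc (by omega) (by omega)
        rw [show ((i : Int) :: stack).length = stack.length + 1 from rfl, hw] at ih1
        cases close? with
        | none =>
          simp only
          rw [hstep]
          exact ih1
        | some close =>
          simp only
          obtain ⟨hcl, hcl2, -⟩ := walkB_close cs fuel (i + 1) (stack.length + 1) close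
            (by rw [hw])
          simp only at ih1
          rw [walkB_out]
          rcases hr : walkB cs fuel (close + 1) stack.length [] with ⟨items2, o2⟩
          have ih2 := ih (close + 1) stack
            (acc ++ inner ++ [((stack.length : Int),
              String.ofList (PySem.List.slice cs (some ((i : Int) + 1)) (some (close : Int))))])
            (by omega) (by omega)
          rw [hr] at ih2
          cases o2 with
          | none =>
            simp only
            rw [hstep, ih1, ih2]
            simp
          | some close2 =>
            simp only
            cases stack with
            | nil => simp only at ih2
            | cons t2 rest2 =>
              simp only at ih2 ⊢
              rw [hstep, ih1, ih2]
              simp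
      · rw [if_neg hc]
        by_cases hd : c = ')' ∧ 0 < stack.length
        · rw [if_pos hd]
          simp only
          cases stack with
          | nil => simp at hd
          | cons t rest =>
            dsimp only
            rw [runA_step cs i _ hilt, hci, hd.1]
            simp [stepA]
        · rw [if_neg hd]
          have hstep : runA cs i (stack, acc) = runA cs (i + 1) (stack, acc) := by
            rw [runA_step cs i _ hilt, hci]
            unfold stepA
            simp only [if_neg hc]
            by_cases hcr : c = ')'
            · rw [if_pos hcr]
              cases stack with
              | nil => rfl
              | cons t rest => exact absurd ⟨hcr, by simp⟩ hd
            · rw [if_neg hcr]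
          rcases hw : walkB cs fuel (i + 1) stack.length [] with ⟨items, o⟩
          have ih3 := ih (i + 1) stack acc (by omega) (by omega)
          rw [hw] at ih3
          cases o with
          | none =>
            simp only at ih3 ⊢
            rw [hstep]; exact ih3
          | some close =>
            cases stack with
            | nil => simp only at ih3
            | cons t rest =>
              simp only at ih3 ⊢
              rw [hstep]; exact ih3

-- ===== VERDICT (by name: the statement is the Claim_ definition above) =====
theorem parse_parentheses_spec : Claim_equal_parse_parentheses := by
  intro s _
  unfold Spec_parse_parentheses parse_parentheses parse_parentheses_alt
  simp only
  have h := walkB_runA s.toList (s.toList.length + 1) 0 [] [] (by omega) (by omega)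
  rcases hw : walkB s.toList (s.toList.length + 1) 0 0 [] with ⟨items, o⟩
  rw [show ([] : List Int).length = 0 from rfl, hw] at h
  cases o with
  | some close =>
    exact absurd (walkB_close _ _ _ _ _ (by rw [hw])).2.2 (by omega)
  | none =>
    simp only at h
    unfold runA at h
    simp only [List.drop_zero, Nat.cast_zero, List.nil_append] at h
    simpa using h
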